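-- pv_equiv track=rewrite | github.com/lzpxilfe/ar | tools/cost_surface_dialog.py | _split_qgis_ogr_uri
-- ===== SOURCE A (Python) =====
-- def _split_qgis_ogr_uri(source: str):
--     """
--     Parse common QGIS OGR-style source URIs like:
--     - path.gpkg|layername=name
--     - path.gpkg|layerid=0
--     Returns (dataset_path, layer_name, layer_id).
--     """
--     s = (str(source or "")).strip()
--     if not s:
--         return "", None, None
--     parts = s.split("|")
--     dataset_path = (parts[0] or "").strip()
--     layer_name = None
--     layer_id = None
--     for p in parts[1:]:
--         if "=" not in p:
--             continue
--         k, v = p.split("=", 1)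
--         k = (k or "").strip().lower()
--         v = (v or "").strip()
--         if k == "layername" and v:
--             layer_name = v
--         elif k == "layerid":
--             try:
--                 layer_id = int(v)
--             except Exception:
--                 layer_id = None
--     return dataset_path, layer_name, layer_id
-- ===== SOURCE B (Python) =====
-- def _split_qgis_ogr_uri(source: str):
--     """
--     Parse QGIS OGR-style URIs like path.gpkg|layername=name|layerid=0.
--     Returns (dataset_path, layer_name, layer_id).
--
--     Strategy: normalize all pipe-separated options into a (key, value) list, then answer
--     each question by the FIRST match scanning that list backwards (which is the
--     last occurrence, matching forward last-wins), instead of folding state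
--     through a loop.
--     """
--     s = str(source or "").strip()
--     if not s:
--         return "", None, None
--     parts = s.split("|")
--     kvs = [(k.strip().lower(), v.strip())
--            for k, v in (p.split("=", 1) for p in parts[1:] if "=" in p)]
--     layer_name = next((v for k, v in reversed(kvs) if k == "layername" and v), None)
--     lid = next((v for k, v in reversed(kvs) if k == "layerid"), None)
--     layer_id = None
--     if lid is not None:
--         try:
--             layer_id = int(lid)
--         except ValueError:
--             pass
--     return parts[0].strip(), layer_name, layer_id
-- ===== Notes on version B (the rewrite author's own statement) =====
-- stated objective: alternative
-- what changed: B first normalizes all pipe-separated options into a (key, value) list, then answers each question by a declarative backward search (first match scanning the list in reverse = A's last-wins), replacing A's stateful forward loop that mutates layer_name/layer_id per occurrence and re-parses int on every layerid.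
import Mathlib
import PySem

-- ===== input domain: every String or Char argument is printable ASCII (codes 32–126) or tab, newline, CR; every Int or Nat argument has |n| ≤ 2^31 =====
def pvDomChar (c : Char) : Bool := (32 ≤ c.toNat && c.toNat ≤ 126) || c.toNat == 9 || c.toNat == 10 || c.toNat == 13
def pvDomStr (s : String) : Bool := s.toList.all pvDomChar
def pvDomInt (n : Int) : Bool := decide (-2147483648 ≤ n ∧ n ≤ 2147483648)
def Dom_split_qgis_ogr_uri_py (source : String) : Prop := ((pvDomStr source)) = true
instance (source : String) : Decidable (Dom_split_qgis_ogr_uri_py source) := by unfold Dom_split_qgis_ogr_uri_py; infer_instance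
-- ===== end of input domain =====

-- B normalizes the pipe-separated options into a (key,value) list and answers by backward search
-- (first match in reverse = A's forward last-wins loop); objective: alternative.

-- ===== PORT A =====
-- one loop iteration of A: updates (layer_name, layer_id) from one part
def split_qgis_ogr_uri_py_step (st : Option String × Option Int) (p : String) :
    Option String × Option Int :=
  if PySem.Str.isIn "=" p = false then st          -- 'if "=" not in p: continue'
  else
    match PySem.Str.splitMax? p "=" 1 with          -- 'k, v = p.split("=", 1)'
    | some (k0 :: v0 :: _) =>
      let k := PySem.Str.lower (PySem.Str.strip k0)
      let v := PySem.Str.strip v0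
      if k = "layername" ∧ v ≠ "" then (some v, st.2)
      else if k = "layerid" then (st.1, PySem.Int.ofStr? v)  -- int(v); on exception None
      else st
    | _ => st

def split_qgis_ogr_uri_py (source : String) : String × Option String × Option Int :=
  let s := PySem.Str.strip source
  if s = "" then ("", none, none)
  else
    let parts := (PySem.Str.split? s "|").getD []   -- s.split("|"); sep ≠ "" so never none
    let dataset_path := PySem.Str.strip (parts.headD "")   -- (parts[0] or "").strip()
    let st := (parts.drop 1).foldl split_qgis_ogr_uri_py_step (none, none)
    (dataset_path, st.1, st.2)

-- ===== PORT B =====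
-- the comprehension body: a part with '=' becomes a normalized (key, value) pair
def split_qgis_ogr_uri_py_alt_kv? (p : String) : Option (String × String) :=
  if PySem.Str.isIn "=" p then
    match PySem.Str.splitMax? p "=" 1 with
    | some (k0 :: v0 :: _) =>
        some (PySem.Str.lower (PySem.Str.strip k0), PySem.Str.strip v0)
    | _ => none
  else none

def split_qgis_ogr_uri_py_alt (source : String) : String × Option String × Option Int :=
  let s := PySem.Str.strip source
  if s = "" then ("", none, none)
  else
    let parts := (PySem.Str.split? s "|").getD []
    let kvs := (parts.drop 1).filterMap split_qgis_ogr_uri_py_alt_kv?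
    -- next((v for k, v in reversed(kvs) if k == "layername" and v), None)
    let layer_name := (kvs.reverse.find? (fun kv => kv.1 == "layername" && kv.2 != "")).map Prod.snd
    -- lid = next((v for k, v in reversed(kvs) if k == "layerid"), None); layer_id = int(lid) or None
    let layer_id := ((kvs.reverse.find? (fun kv => kv.1 == "layerid")).map Prod.snd).bind PySem.Int.ofStr?
    (PySem.Str.strip (parts.headD ""), layer_name, layer_id)

-- ===== PRECONDITION & SPEC =====
def Spec_split_qgis_ogr_uri_py (source : String) (out : String × Option String × Option Int) : Prop := out = split_qgis_ogr_uri_py_alt source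
instance (source : String) (out : String × Option String × Option Int) : Decidable (Spec_split_qgis_ogr_uri_py source out) := by unfold Spec_split_qgis_ogr_uri_py; infer_instance

-- ===== CLAIM =====
def Claim_equal_split_qgis_ogr_uri_py : Prop := ∀ (source : String), Dom_split_qgis_ogr_uri_py source → Spec_split_qgis_ogr_uri_py source (split_qgis_ogr_uri_py source)

-- ===== LEMMAS AND PROOFS =====

-- A's step leaves the state unchanged on a part the comprehension drops
theorem split_qgis_ogr_uri_step_none (st : Option String × Option Int) (p : String)
    (hkv : split_qgis_ogr_uri_py_alt_kv? p = none) :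
    split_qgis_ogr_uri_py_step st p = st := by
  unfold split_qgis_ogr_uri_py_step
  unfold split_qgis_ogr_uri_py_alt_kv? at hkv
  cases hin : PySem.Str.isIn "=" p with
  | false => simp
  | true =>
    simp only [hin, if_true] at hkv
    simp only [Bool.true_eq_false, if_false]
    cases hsp : PySem.Str.splitMax? p "=" 1 with
    | none => rfl
    | some ks =>
      cases ks with
      | nil => rfl
      | cons a tl =>
        cases tl with
        | nil => rfl
        | cons b rest => simp [hsp] at hkv

-- A's step, expressed through the normalized pair the comprehension produces
theorem split_qgis_ogr_uri_step_some (st : Option String × Option Int) (p k v : String)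
    (hkv : split_qgis_ogr_uri_py_alt_kv? p = some (k, v)) :
    split_qgis_ogr_uri_py_step st p =
      (if k = "layername" ∧ v ≠ "" then (some v, st.2)
       else if k = "layerid" then (st.1, PySem.Int.ofStr? v)
       else st) := by
  unfold split_qgis_ogr_uri_py_step
  unfold split_qgis_ogr_uri_py_alt_kv? at hkv
  cases hin : PySem.Str.isIn "=" p with
  | false =>
    rw [PySem.Str.isIn_eq, show ("=" : String).toList = ['='] from rfl] at hin
    simp [hin] at hkv
  | true =>
    simp only [hin, if_true] at hkv
    simp only [Bool.true_eq_false, if_false]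
    cases hsp : PySem.Str.splitMax? p "=" 1 with
    | none => simp [hsp] at hkv
    | some ks =>
      cases ks with
      | nil => simp [hsp] at hkv
      | cons a tl =>
        cases tl with
        | nil => simp [hsp] at hkv
        | cons b rest =>
          simp only [hsp, Option.some.injEq, Prod.mk.injEq] at hkv
          obtain ⟨hk, hv⟩ := hkv
          subst hk; subst hv; rfl

-- characterization of A's loop: its final state is B's two backward searches,
-- falling back to the initial state where the search finds nothing
theorem split_qgis_ogr_uri_fold_char (l : List String) (st : Option String × Option Int) :
    l.foldl split_qgis_ogr_uri_py_step st =
      ( (((l.filterMap split_qgis_ogr_uri_py_alt_kv?).reverse.find?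
            (fun kv => kv.1 == "layername" && kv.2 != "")).map Prod.snd).or st.1,
        match (l.filterMap split_qgis_ogr_uri_py_alt_kv?).reverse.find?
            (fun kv => kv.1 == "layerid") with
        | some kv => PySem.Int.ofStr? kv.2
        | none => st.2 ) := by
  induction l generalizing st with
  | nil => simp
  | cons p l ih =>
    rw [List.foldl_cons, ih, List.filterMap_cons]
    cases hkv : split_qgis_ogr_uri_py_alt_kv? p with
    | none => rw [split_qgis_ogr_uri_step_none st p hkv]
    | some kv =>
      obtain ⟨k, v⟩ := kv
      rw [split_qgis_ogr_uri_step_some st p k v hkv]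
      rw [List.reverse_cons, List.find?_append, List.find?_append, Prod.ext_iff]
      by_cases h1 : k = "layername" ∧ v ≠ ""
      · -- a non-empty layername: it wins unless a later part overrides it
        obtain ⟨hk1, hv1⟩ := h1
        subst hk1
        have hbv : (v != "") = true := by simp [hv1]
        constructor
        · simp only [List.find?_cons, List.find?_nil]
          cases hf : ((l.filterMap split_qgis_ogr_uri_py_alt_kv?).reverse.find?
              (fun kv => kv.1 == "layername" && kv.2 != "")) <;> simp [hf, hbv, hv1, Option.or]
        · simp only [List.find?_cons, List.find?_nil]
          cases hf : ((l.filterMap split_qgis_ogr_uri_py_alt_kv?).reverse.find?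
              (fun kv => kv.1 == "layerid")) <;> simp [hf, hbv, hv1]
      · by_cases h2 : k = "layerid"
        · -- a layerid part: the last one determines layer_id
          subst h2
          constructor
          · simp only [List.find?_cons, List.find?_nil]
            cases hf : ((l.filterMap split_qgis_ogr_uri_py_alt_kv?).reverse.find?
                (fun kv => kv.1 == "layername" && kv.2 != "")) <;> simp [hf, h1, Option.or]
          · simp only [List.find?_cons, List.find?_nil]
            cases hf : ((l.filterMap split_qgis_ogr_uri_py_alt_kv?).reverse.find?
                (fun kv => kv.1 == "layerid")) <;> simp [hf, h1, Option.or]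
        · -- any other option (or an empty layername value): the state is unchanged
          have hb1 : ((k, v).1 == "layername" && (k, v).2 != "") = false := by
            by_cases hkn : k = "layername"
            · have hve : v = "" := by by_contra hne; exact h1 ⟨hkn, hne⟩
              simp [hve]
            · simp [hkn]
          have hb2 : ((k, v).1 == "layerid") = false := by simp [h2]
          constructor
          · simp only [List.find?_cons, List.find?_nil, hb1]
            cases hf : ((l.filterMap split_qgis_ogr_uri_py_alt_kv?).reverse.find?
                (fun kv => kv.1 == "layername" && kv.2 != "")) <;> simp [hf, h1, h2, Option.or]
          · simp only [List.find?_cons, List.find?_nil, hb2]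
            cases hf : ((l.filterMap split_qgis_ogr_uri_py_alt_kv?).reverse.find?
                (fun kv => kv.1 == "layerid")) <;> simp [hf, h1, h2, Option.or]

-- ===== VERDICT =====
theorem split_qgis_ogr_uri_py_spec : Claim_equal_split_qgis_ogr_uri_py := by
  intro source _
  unfold Spec_split_qgis_ogr_uri_py
  by_cases hs : PySem.Str.strip source = ""
  · simp only [split_qgis_ogr_uri_py, split_qgis_ogr_uri_py_alt, if_pos hs]
  · have h := split_qgis_ogr_uri_fold_char
      (((PySem.Str.split? (PySem.Str.strip source) "|").getD []).drop 1) (none, none)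
    simp only [split_qgis_ogr_uri_py, split_qgis_ogr_uri_py_alt, if_neg hs, h,
      Option.or_none, Prod.mk.injEq]
    refine ⟨trivial, trivial, ?_⟩
    cases hf : ((((PySem.Str.split? (PySem.Str.strip source) "|").getD []).drop 1).filterMap
        split_qgis_ogr_uri_py_alt_kv?).reverse.find? (fun kv => kv.1 == "layerid") <;> simp [hf]
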